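-- pv_equiv track=rewrite | github.com/EAFIT-AACS/assignment2-entrega1lfyc | ALGORITHM_3_LFCO_2025_DSA_LIG.py | leftmost_derivation
-- ===== SOURCE A (Python) =====
-- def leftmost_derivation(cadena):
--     """
--     Tenemos la Gramática: S -> aSb | ε
--     """
--     try:   #Previene errores de cadenas que no pertenecen al lenguaje
--         if cadena.count('a') != cadena.count('b') or "ba" in cadena:
--             raise ValueError("La cadena no pertenece al lenguaje generado por la gramática.")
--
--         pasos = []  # Lista para guardar los pasos de la derivación
--         S = "S"
--         pasos.append(S)
--
--         num_a = cadena.count('a') # Cuenta cuantos 'a' tiene la cadena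
--         forma_actual = "S"
--
--         for _ in range(num_a):   # iniciamos reemplazando "S" por "aSb"
--             forma_actual = forma_actual.replace("S", "aSb", 1)
--             pasos.append(forma_actual)
--
--         forma_actual = forma_actual.replace("S", "ε", 1)  # Al final, reemplaza "S" por ε  para terminar la derivación
--         pasos.append(forma_actual)
--         cadena_final = forma_actual.replace("ε", "")
--         pasos.append(f"La cadena derivada es: {cadena_final}")
--
--         return pasos
--     except ValueError as e:  # Si en algun momneto la cadena no es válida, hace catch al error y lo retorna
--         return [str(e)]
-- ===== SOURCE B (Python) =====
-- def leftmost_derivation(cadena):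
--     if cadena.count('a') != cadena.count('b') or "ba" in cadena:
--         return ["La cadena no pertenece al lenguaje generado por la gramática."]
--     n = cadena.count('a')
--     return (["S"]
--             + ['a' * i + 'S' + 'b' * i for i in range(1, n + 1)]
--             + ['a' * n + 'ε' + 'b' * n,
--                "La cadena derivada es: " + 'a' * n + 'b' * n])
-- ===== Notes on version B (the rewrite author's own statement) =====
-- stated objective: simpler
-- what changed: B drops the mutated accumulator string and repeated .replace(...,1) calls: each derivation step a^i S b^i, the ε-step and the final message are built in closed form from the count of 'a's and concatenated into the result list directly.
import Mathlib
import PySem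

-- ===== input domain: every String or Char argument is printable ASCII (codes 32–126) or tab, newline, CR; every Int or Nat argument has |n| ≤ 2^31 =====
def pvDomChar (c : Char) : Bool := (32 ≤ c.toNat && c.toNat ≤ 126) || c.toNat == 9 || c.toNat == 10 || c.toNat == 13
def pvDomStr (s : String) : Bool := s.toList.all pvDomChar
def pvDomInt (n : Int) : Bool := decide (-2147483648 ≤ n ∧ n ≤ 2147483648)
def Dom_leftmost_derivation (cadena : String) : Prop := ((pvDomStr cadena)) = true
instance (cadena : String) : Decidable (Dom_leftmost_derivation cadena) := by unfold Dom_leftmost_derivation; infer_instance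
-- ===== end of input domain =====

-- B replaces A's mutated accumulator string (repeated `.replace("S", …, 1)`) by direct closed-form
-- construction of each derivation step from its index (objective: simpler).


-- ===== PORT A =====
-- s.replace(old, new, 1): replace the FIRST occurrence of old, left to right.
-- Hand-ported (PySem.Chars.replace has no count parameter); exact for nonempty old,
-- and A only calls it with old = "S" / "ε".
def pyReplace1 (s old new : List Char) : List Char :=
  match s with
  | [] => []
  | c :: t =>
    if old.isPrefixOf (c :: t) then new ++ (c :: t).drop old.length
    else c :: pyReplace1 t old new

-- Transliteration of A: guard, then a loop over range(num_a) carrying (pasos, forma_actual);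
-- pasos is kept as List (List Char) and converted to String once at the end.
def leftmost_derivation (cadena : String) : List String :=
  let cs := cadena.toList
  if PySem.Chars.count cs ['a'] ≠ PySem.Chars.count cs ['b'] ∨
      PySem.Chars.isIn ['b', 'a'] cs then
    ["La cadena no pertenece al lenguaje generado por la gramática."]
  else
    let S : List Char := ['S']
    let numA := PySem.Chars.count cs ['a']
    let st :=
      (PySem.List.pyRange 0 (numA : Int) 1).foldl
        (fun (st : List (List Char) × List Char) _ =>
          let f := pyReplace1 st.2 ['S'] ['a', 'S', 'b']
          (st.1 ++ [f], f))
        ([S], S)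
    let f2 := pyReplace1 st.2 ['S'] ['ε']
    let cadenaFinal := PySem.Chars.replace f2 ['ε'] []
    ((st.1 ++ [f2]) ++ ["La cadena derivada es: ".toList ++ cadenaFinal]).map
      (fun l => String.ofList l)

-- ===== PORT B =====
-- Transliteration of B: same guard, then every step computed in closed form from its index.
def leftmost_derivation_alt (cadena : String) : List String :=
  let cs := cadena.toList
  if PySem.Chars.count cs ['a'] ≠ PySem.Chars.count cs ['b'] ∨
      PySem.Chars.isIn ['b', 'a'] cs then
    ["La cadena no pertenece al lenguaje generado por la gramática."]
  else
    let n := PySem.Chars.count cs ['a']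
    (([['S']]
      ++ (PySem.List.pyRange 1 ((n : Int) + 1) 1).map
           (fun i => List.replicate i.toNat 'a' ++ ['S'] ++ List.replicate i.toNat 'b')
      ++ [List.replicate n 'a' ++ ['ε'] ++ List.replicate n 'b',
          "La cadena derivada es: ".toList ++ List.replicate n 'a' ++ List.replicate n 'b'])).map
      (fun l => String.ofList l)

-- ===== PRECONDITION & SPEC =====
def Spec_leftmost_derivation (cadena : String) (out : List String) : Prop := out = leftmost_derivation_alt cadena
instance (cadena : String) (out : List String) : Decidable (Spec_leftmost_derivation cadena out) := by unfold Spec_leftmost_derivation; infer_instance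

-- ===== CLAIM (what is proved, stated in full; the proofs are below) =====
def Claim_equal_leftmost_derivation : Prop := ∀ (cadena : String), Dom_leftmost_derivation cadena → Spec_leftmost_derivation cadena (leftmost_derivation cadena)

-- ===== LEMMAS AND PROOFS =====

-- the intermediate sentential form a^k S b^k
def pvForm (k : Nat) : List Char :=
  List.replicate k 'a' ++ ['S'] ++ List.replicate k 'b'

theorem replicate_comm (c : Char) (n : Nat) (l : List Char) :
    List.replicate n c ++ c :: l = c :: (List.replicate n c ++ l) := by
  rw [← List.singleton_append, ← List.append_assoc, ← List.replicate_succ']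
  simp [List.replicate_succ]

theorem pyReplace1_cons_ne (c : Char) (t new : List Char) (h : c ≠ 'S') :
    pyReplace1 (c :: t) ['S'] new = c :: pyReplace1 t ['S'] new := by
  rw [pyReplace1, if_neg]
  simp only [List.isPrefixOf, Bool.and_eq_true, beq_iff_eq]
  exact fun hp => h hp.1.symm

theorem pyReplace1_S (t new : List Char) :
    pyReplace1 ('S' :: t) ['S'] new = new ++ t := by
  rw [pyReplace1, if_pos (by simp [List.isPrefixOf])]
  simp

theorem pyReplace1_a_block (u new : List Char) (m : Nat) :
    pyReplace1 (List.replicate m 'a' ++ 'S' :: u) ['S'] new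
      = List.replicate m 'a' ++ new ++ u := by
  induction m with
  | zero => simp [pyReplace1_S]
  | succ m ihm =>
    rw [List.replicate_succ, List.cons_append, pyReplace1_cons_ne _ _ _ (by decide), ihm]
    simp

theorem pyReplace1_form (k : Nat) (new : List Char) :
    pyReplace1 (pvForm k) ['S'] new = List.replicate k 'a' ++ new ++ List.replicate k 'b' := by
  have h : pvForm k = List.replicate k 'a' ++ 'S' :: List.replicate k 'b' := by simp [pvForm]
  rw [h, pyReplace1_a_block]

theorem loop_closed (n : Nat) :
    (PySem.List.pyRange 0 (n : Int) 1).foldl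
        (fun (st : List (List Char) × List Char) _ =>
          let f := pyReplace1 st.2 ['S'] ['a', 'S', 'b']
          (st.1 ++ [f], f))
        ([['S']], ['S'])
      = ([['S']] ++ (List.range n).map (fun i => pvForm (i + 1)), pvForm n) := by
  induction n with
  | zero => simp [PySem.List.pyRange_one_eq_nil, pvForm]
  | succ n ih =>
    have hr : PySem.List.pyRange 0 ((n : Int) + 1) 1
        = PySem.List.pyRange 0 (n : Int) 1 ++ [(n : Int)] :=
      PySem.List.pyRange_one_succ_right (by positivity)
    push_cast
    rw [hr, List.foldl_append, ih]
    simp only [List.foldl_cons, List.foldl_nil]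
    rw [pyReplace1_form]
    have hform : List.replicate n 'a' ++ ['a', 'S', 'b'] ++ List.replicate n 'b'
        = pvForm (n + 1) := by
      simp only [pvForm]
      rw [show List.replicate (n + 1) 'a' = List.replicate n 'a' ++ ['a'] from
            List.replicate_succ' .. ,
          show List.replicate (n + 1) 'b' = 'b' :: List.replicate n 'b' from
            List.replicate_succ .. ]
      simp
    rw [hform]
    simp [List.range_succ]

-- replace.go on a string with no 'ε' just rebuilds it
theorem go_no_eps (l : List Char) : ∀ (fuel : Nat) (acc : List Char), l.length ≤ fuel →
    'ε' ∉ l → PySem.Chars.replace.go ['ε'] [] fuel l acc = acc.reverse ++ l := by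
  induction l with
  | nil => intro fuel acc _ _; cases fuel <;> simp [PySem.Chars.replace.go]
  | cons c t ih =>
    intro fuel acc hf hm
    cases fuel with
    | zero => simp at hf
    | succ f =>
      have hc : c ≠ 'ε' := fun h => hm (h ▸ List.mem_cons_self)
      simp only [PySem.Chars.replace.go]
      rw [if_neg (by simp only [List.isPrefixOf, Bool.and_eq_true, beq_iff_eq, and_true]; exact fun hp => hc hp.symm)]
      rw [ih f (c :: acc) (by simpa using hf) (fun h => hm (List.mem_cons_of_mem _ h))]
      simp

-- replace.go walks over a block of 'a's
theorem go_skip_as (k : Nat) : ∀ (fuel : Nat) (rest acc : List Char),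
    PySem.Chars.replace.go ['ε'] [] (k + fuel) (List.replicate k 'a' ++ rest) acc
      = PySem.Chars.replace.go ['ε'] [] fuel rest (List.replicate k 'a' ++ acc) := by
  induction k with
  | zero => simp
  | succ k ih =>
    intro fuel rest acc
    have h1 : (k + 1) + fuel = (k + fuel) + 1 := by omega
    rw [h1, List.replicate_succ, List.cons_append]
    simp only [PySem.Chars.replace.go]
    rw [if_neg (by simp only [List.isPrefixOf, Bool.and_eq_true, beq_iff_eq, and_true]; decide)]
    rw [ih fuel rest ('a' :: acc), replicate_comm]
    simp

theorem replace_eps (n : Nat) :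
    PySem.Chars.replace (List.replicate n 'a' ++ ['ε'] ++ List.replicate n 'b') ['ε'] []
      = List.replicate n 'a' ++ List.replicate n 'b' := by
  unfold PySem.Chars.replace
  rw [if_neg (by simp)]
  have hlen : (List.replicate n 'a' ++ ['ε'] ++ List.replicate n 'b').length = n + (n + 1) := by
    simp
  rw [hlen, List.append_assoc, go_skip_as n (n + 1)]
  simp only [List.singleton_append, List.append_nil]
  have hstep : PySem.Chars.replace.go ['ε'] [] (n + 1) ('ε' :: List.replicate n 'b')
        (List.replicate n 'a')
      = PySem.Chars.replace.go ['ε'] [] n (List.replicate n 'b') (List.replicate n 'a') := by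
    simp only [PySem.Chars.replace.go]
    rw [if_pos (by simp [List.isPrefixOf])]
    try simp
  rw [hstep, go_no_eps _ n _ (by simp) (by simp)]
  simp

-- the B-side comprehension over pyRange 1 (n+1) equals the A-side map over range n
theorem pyRange_map_forms (n : Nat) :
    (PySem.List.pyRange 1 ((n : Int) + 1) 1).map
        (fun i => List.replicate i.toNat 'a' ++ ['S'] ++ List.replicate i.toNat 'b')
      = (List.range n).map (fun i => pvForm (i + 1)) := by
  rw [PySem.List.pyRange_one]
  have h : ((n : Int) + 1 - 1).toNat = n := by omega
  rw [h, List.map_map]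
  apply List.map_congr_left
  intro k _
  have hk : ((1 : Int) + (k : Int)).toNat = k + 1 := by omega
  simp [pvForm, hk]

-- ===== VERDICT (by name: the statement is the Claim_ definition above) =====
theorem leftmost_derivation_spec : Claim_equal_leftmost_derivation := by
  intro cadena _
  unfold Spec_leftmost_derivation leftmost_derivation leftmost_derivation_alt
  by_cases h : PySem.Chars.count cadena.toList ['a'] ≠ PySem.Chars.count cadena.toList ['b'] ∨
      PySem.Chars.isIn ['b', 'a'] cadena.toList
  · simp only [h, if_pos]
  · simp only [h, if_false]
    rw [loop_closed, pyReplace1_form, pyRange_map_forms]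
    rw [List.append_assoc (List.replicate (PySem.Chars.count cadena.toList ['a']) 'a') ['ε'],
      ← List.append_assoc (List.replicate (PySem.Chars.count cadena.toList ['a']) 'a') ['ε']]
    rw [replace_eps]
    simp
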